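-- pv_equiv track=rewrite | github.com/alexandraback/datacollection | solutions_5753053697277952_1/Python/arknave/a.py | solve
-- ===== SOURCE A (Python) =====
-- def solve(n, p):
--     total = sum(p)
--     moves = []
--
--     if n == 2:
--         while p[0] > p[1]:
--             moves.append('A')
--             p[0] -= 1
--         while p[0] < p[1]:
--             moves.append('B')
--             p[0] -= 1
--         while p[0] > 0:
--             moves.append('AB')
--             p[0] -= 1
--
--         return ' '.join(moves)
--
--     while total > 0:
--         max_ind = 0
--         max_val = p[0]
--         for i, e in enumerate(p):
--             if e > max_val:
--                 max_ind, max_val = i, e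
--
--         for i, e in enumerate(p):
--             if i == max_ind:
--                 continue
--
--         p[max_ind] -= 1
--         total -= 1
--         moves.append(chr(ord('A') + max_ind))
--
--     moves[-2] += moves[-1]
--     moves = moves[:-1]
--     return ' '.join(moves)
-- ===== SOURCE B (Python) =====
-- def solve(n, p):
--     # Level-sweep re-implementation: the greedy "decrement the current maximum,
--     # first index on ties" emits, for each level v from max(p) down to 1, the
--     # indices i with p[i] >= v in increasing order; A stops after sum(p) steps,
--     # so truncate the level sequence to sum(p) moves.  (Does not mutate p.)
--     if n == 2:
--         a, b = p[0], p[1]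
--         if a >= b:
--             return ' '.join(['A'] * (a - b) + ['AB'] * b)
--         return ' '.join(['B'] * (b - a) + ['AB'] * a)
--     total = sum(p)
--     mx = max(p)
--     seq = []
--     for v in range(mx, 0, -1):
--         for i in range(len(p)):
--             if p[i] >= v:
--                 seq.append(chr(ord('A') + i))
--     seq = seq[:total]
--     seq[-2] += seq[-1]
--     return ' '.join(seq[:-1])
-- ===== Notes on version B (the rewrite author's own statement) =====
-- stated objective: faster
-- what changed: Replaces the step-by-step simulation (rescan the whole list for the argmax at each of the sum(p) steps) by a level sweep: for each height v from max(p) down to 1 emit every index whose pile reaches v, in index order, then truncate to sum(p) moves; the n==2 branch becomes a closed-form join of replicated move strings.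
import Mathlib
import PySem

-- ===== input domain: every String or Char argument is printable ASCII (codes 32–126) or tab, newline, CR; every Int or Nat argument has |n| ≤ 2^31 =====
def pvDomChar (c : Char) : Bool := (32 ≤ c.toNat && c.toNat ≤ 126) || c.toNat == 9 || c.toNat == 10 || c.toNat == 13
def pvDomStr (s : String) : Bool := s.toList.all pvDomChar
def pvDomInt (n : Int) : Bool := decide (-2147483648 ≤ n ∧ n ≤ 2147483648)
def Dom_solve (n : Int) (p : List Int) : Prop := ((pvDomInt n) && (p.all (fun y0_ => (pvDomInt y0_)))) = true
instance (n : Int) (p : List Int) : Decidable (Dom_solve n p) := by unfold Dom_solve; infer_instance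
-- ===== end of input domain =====

-- B replaces A's per-step argmax rescan by a single level sweep (emit each level's
-- indices in index order, truncated to sum(p) moves); equivalence is about the RETURN
-- value only: Python A mutates its list argument p in place, B does not.

-- ===== PORT A =====
-- chr(ord('A') + k)
def pyChr (k : Nat) : String := String.singleton (Char.ofNat (65 + k))
-- while p[0] > p[1]: moves.append('A'); p[0] -= 1     (state: p[0], moves)
def solveLoopA (p0 p1 : Int) (moves : List String) : Int × List String :=
  if p1 < p0 then solveLoopA (p0 - 1) p1 (moves ++ ["A"]) else (p0, moves)
termination_by (p0 - p1).toNat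
decreasing_by omega

-- while p[0] > 0: moves.append('AB'); p[0] -= 1
def solveLoopAB (p0 : Int) (moves : List String) : Int × List String :=
  if 0 < p0 then solveLoopAB (p0 - 1) (moves ++ ["AB"]) else (p0, moves)
termination_by p0.toNat
decreasing_by omega

-- for i, e in enumerate(p): if e > max_val: max_ind, max_val = i, e
def solveScan (l : List Int) (i : Nat) (mi : Nat) (mv : Int) : Nat × Int :=
  match l with
  | [] => (mi, mv)
  | e :: rest => if mv < e then solveScan rest (i + 1) i e else solveScan rest (i + 1) mi mv

-- while total > 0: argmax scan; p[max_ind] -= 1; total -= 1; moves.append(chr(ord('A')+max_ind))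
-- (A's second 'for i, e in enumerate(p)' loop has an empty body and is dead code.)
def solveMain (p : List Int) (total : Int) (moves : List String) : List String :=
  if 0 < total then
    match p with
    | [] => moves   -- p[0] would raise IndexError; unreachable: total > 0 forces p ≠ []
    | p0 :: _ =>
      let s := solveScan p 0 0 p0
      solveMain (p.modify s.1 (fun e => e - 1)) (total - 1) (moves ++ [pyChr s.1])
  else moves
termination_by total.toNat
decreasing_by omega

def solve (n : Int) (p : List Int) : String :=
  let _total := p.sum
  if n = 2 then
    match p with
    | p0 :: p1 :: _ =>
      let r1 := solveLoopA p0 p1 []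
      -- 'while p[0] < p[1]: p[0] -= 1' never terminates once entered; under Pre_solve
      -- (p[1] ≤ p[0]) the loop condition is false after the first loop, so it is a no-op.
      let r2 := solveLoopAB r1.1 r1.2
      PySem.Str.join " " r2.2                    -- ' '.join(moves)
    | _ => ""                                    -- p[0]/p[1]: IndexError, excluded by Pre_solve
  else
    let moves := solveMain p _total []
    -- moves[-2] += moves[-1]; moves = moves[:-1]; ' '.join(moves)
    match PySem.List.pyGet? moves (-2), PySem.List.pyGet? moves (-1) with
    | some a, some b => PySem.Str.join " " (moves.dropLast.dropLast ++ [a ++ b])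
    | _, _ => ""                                 -- IndexError (fewer than 2 moves), excluded by Pre_solve

-- ===== PORT B =====
-- chr(ord('A') + k)
def altChr (k : Nat) : String := String.singleton (Char.ofNat (65 + k))
-- inner: for i in range(len(p)): if p[i] >= v: seq.append(chr(ord('A') + i))
def altRow (l : List Int) (k : Nat) (v : Int) (acc : List String) : List String :=
  match l with
  | e :: rest => altRow rest (k + 1) v (if v ≤ e then acc ++ [altChr k] else acc)
  | [] => acc

-- outer: for v in range(mx, 0, -1)
def altLevels (p : List Int) (v : Int) (acc : List String) : List String :=
  if 0 < v then altLevels p (v - 1) (altRow p 0 v acc) else acc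
termination_by v.toNat
decreasing_by omega

def solve_alt (n : Int) (p : List Int) : String :=
  if n = 2 then
    match p with
    | [] => ""                                   -- p[0]: IndexError, excluded by Pre_solve
    | [_] => ""                                  -- p[1]: IndexError, excluded by Pre_solve
    | a :: b :: _ =>
      if b ≤ a then
        PySem.Str.join " " (List.replicate (a - b).toNat "A" ++ List.replicate b.toNat "AB")
      else
        PySem.Str.join " " (List.replicate (b - a).toNat "B" ++ List.replicate a.toNat "AB")
  else
    let total := p.sum
    match PySem.List.max? p (fun x => x) with    -- max(p)
    | none => ""                                 -- max([]): ValueError, excluded by Pre_solve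
    | some mx =>
      let seq := altLevels p mx []
      let seq := PySem.List.slice seq none (some total)   -- seq[:total]
      -- seq[-2] += seq[-1]; ' '.join(seq[:-1])
      match PySem.List.pyGet? seq (-2) with
      | none => ""                               -- IndexError (fewer than 2 moves), excluded by Pre_solve
      | some a =>
        match PySem.List.pyGet? seq (-1) with
        | none => ""
        | some b => PySem.Str.join " " (seq.dropLast.dropLast ++ [a ++ b])

-- ===== PRECONDITION & SPEC =====
-- Pre_solve = exactly the inputs on which Python A returns: with n == 2 it needs two
-- elements (IndexError otherwise) and p[1] ≤ p[0] (its second while loop diverges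
-- otherwise); with n ≠ 2 it needs sum(p) ≥ 2 (moves[-2] raises IndexError otherwise).
def Pre_solve (n : Int) (p : List Int) : Prop :=
  if n = 2 then 2 ≤ p.length ∧ p.getD 1 0 ≤ p.getD 0 0 else 2 ≤ p.sum
instance (n : Int) (p : List Int) : Decidable (Pre_solve n p) := by unfold Pre_solve; infer_instance

def pvWitness_solve : Int × List Int := (3, [2, 1])

def Spec_solve (n : Int) (p : List Int) (out : String) : Prop := out = solve_alt n p
instance (n : Int) (p : List Int) (out : String) : Decidable (Spec_solve n p out) := by unfold Spec_solve; infer_instance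

-- ===== CLAIM (what is proved, stated in full; the proofs are below) =====
def Claim_equal_solve : Prop := ∀ (n : Int) (p : List Int), Dom_solve n p → Pre_solve n p → Spec_solve n p (solve n p)

-- ===== LEMMAS AND PROOFS =====

-- indices i (numbered from k) with l[i] ≥ v, in increasing order
def rowIdx (l : List Int) (k : Nat) (v : Int) : List Nat :=
  match l with
  | [] => []
  | e :: rest => if v ≤ e then k :: rowIdx rest (k + 1) v else rowIdx rest (k + 1) v

-- rows for levels v, v-1, …, 1 concatenated
def rowsF (p : List Int) : Nat → List Nat
  | 0 => []
  | v + 1 => rowIdx p 0 ((v : Int) + 1) ++ rowsF p v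

def sumPos (p : List Int) : Int := (p.map (fun e => max e 0)).sum


-- --- n == 2 branch ---

lemma loopA_eq (k : Nat) : ∀ (b : Int) (m : List String),
    solveLoopA (b + k) b m = (b, m ++ List.replicate k "A") := by
  induction k with
  | zero => intro b m; rw [solveLoopA]; simp
  | succ k ih =>
    intro b m
    rw [solveLoopA]
    have h : b < b + (k + 1 : Nat) := by push_cast; omega
    have h2 : b + ((k : Nat) + 1 : Nat) - 1 = b + k := by push_cast; omega
    rw [if_pos h, h2, ih]
    simp [List.replicate_succ]

lemma loopAB_snd (k : Nat) : ∀ (a : Int) (m : List String), a.toNat = k →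
    (solveLoopAB a m).2 = m ++ List.replicate a.toNat "AB" := by
  induction k with
  | zero => intro a m hk; rw [solveLoopAB]; have : ¬ 0 < a := by omega
            rw [if_neg this]; simp [hk]
  | succ k ih =>
    intro a m hk
    have h : 0 < a := by omega
    rw [solveLoopAB, if_pos h, ih (a - 1) _ (by omega)]
    have : a.toNat = (a-1).toNat + 1 := by omega
    rw [this, List.replicate_succ]
    simp


-- --- rowIdx / rowsF facts ---

lemma rowIdx_append (x y : List Int) : ∀ (k : Nat) (v : Int),
    rowIdx (x ++ y) k v = rowIdx x k v ++ rowIdx y (k + x.length) v := by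
  induction x with
  | nil => intro k v; simp [rowIdx]
  | cons e rest ih =>
    intro k v
    simp only [List.cons_append, rowIdx, ih]
    split <;> simp <;> ring_nf

lemma rowIdx_nil_of_lt (l : List Int) : ∀ (k : Nat) (v : Int), (∀ e ∈ l, e < v) → rowIdx l k v = [] := by
  induction l with
  | nil => intro k v _; rfl
  | cons e rest ih =>
    intro k v h
    have he := h e (by simp)
    simp only [rowIdx, if_neg (by omega : ¬ v ≤ e)]
    exact ih _ _ (fun x hx => h x (by simp [hx]))

lemma modify_append (A B : List Int) (x : Int) (f : Int → Int) :
    (A ++ x :: B).modify A.length f = A ++ f x :: B := by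
  induction A with
  | nil => simp [List.modify]
  | cons a A ih => simpa [List.modify] using ih

lemma rows_bound (p : List Int) (w : Int) (hw : ∀ e ∈ p, e ≤ w) :
    ∀ u : Nat, w.toNat ≤ u → rowsF p u = rowsF p w.toNat := by
  intro u hu
  induction u with
  | zero => have h0 : w.toNat = 0 := by omega
            rw [h0]
  | succ u ih =>
    rcases Nat.lt_or_ge w.toNat (u+1) with h | h
    · have h' : w.toNat ≤ u := by omega
      rw [rowsF, rowIdx_nil_of_lt _ _ _ (by intro e he; have := hw e he; omega), List.nil_append, ih h']
    · have : w.toNat = u + 1 := by omega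
      rw [this]

lemma rows_congr_below (p p' : List Int) (c : Int)
    (h : ∀ v : Int, 1 ≤ v → v ≤ c → rowIdx p' 0 v = rowIdx p 0 v) :
    ∀ k : Nat, (k : Int) ≤ c → rowsF p' k = rowsF p k := by
  intro k
  induction k with
  | zero => intro _; rfl
  | succ k ih =>
    intro hk
    rw [rowsF, rowsF, h ((k : Int) + 1) (by omega) (by push_cast at hk ⊢; omega), ih (by push_cast at hk ⊢; omega)]


-- --- the argmax scan of A: invariant characterisation ---

lemma scan_inv (l : List Int) : ∀ (pre : List Int) (mi : Nat) (mv : Int),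
    mi < pre.length → pre[mi]? = some mv →
    (∀ e ∈ pre.take mi, e < mv) → (∀ e ∈ pre, e ≤ mv) →
    (solveScan l pre.length mi mv).1 < (pre ++ l).length ∧
    (pre ++ l)[(solveScan l pre.length mi mv).1]? = some (solveScan l pre.length mi mv).2 ∧
    (∀ e ∈ (pre ++ l).take (solveScan l pre.length mi mv).1, e < (solveScan l pre.length mi mv).2) ∧
    (∀ e ∈ pre ++ l, e ≤ (solveScan l pre.length mi mv).2) := by
  induction l with
  | nil =>
    intro pre mi mv h1 h2 h3 h4
    simp only [solveScan, List.append_nil]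
    exact ⟨h1, h2, h3, h4⟩
  | cons e rest ih =>
    intro pre mi mv h1 h2 h3 h4
    have hsplit : pre ++ e :: rest = (pre ++ [e]) ++ rest := by simp
    have hlen : (pre ++ [e]).length = pre.length + 1 := by simp
    rw [hsplit]
    simp only [solveScan]
    by_cases hc : mv < e
    · rw [if_pos hc]
      rw [← hlen]
      exact ih (pre ++ [e]) pre.length e (by simp)
        (by simp)
        (by simpa using fun x hx => lt_of_le_of_lt (h4 x hx) hc)
        (by intro x hx
            rcases List.mem_append.1 hx with h | h
            · exact le_of_lt (lt_of_le_of_lt (h4 x h) hc)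
            · simp at h; omega)
    · rw [if_neg hc]
      rw [← hlen]
      exact ih (pre ++ [e]) mi mv (by simp; omega)
        (by rw [List.getElem?_append_left h1]; exact h2)
        (by rw [List.take_append_of_le_length (by omega)]; exact h3)
        (by intro x hx
            rcases List.mem_append.1 hx with h | h
            · exact h4 x h
            · simp at h; omega)

lemma scan_full (p0 : Int) (rest : List Int) :
    (solveScan (p0 :: rest) 0 0 p0).1 < (p0 :: rest).length ∧
    (p0 :: rest)[(solveScan (p0 :: rest) 0 0 p0).1]? = some (solveScan (p0 :: rest) 0 0 p0).2 ∧
    (∀ e ∈ (p0 :: rest).take (solveScan (p0 :: rest) 0 0 p0).1, e < (solveScan (p0 :: rest) 0 0 p0).2) ∧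
    (∀ e ∈ p0 :: rest, e ≤ (solveScan (p0 :: rest) 0 0 p0).2) := by
  have h0 : solveScan (p0 :: rest) 0 0 p0 = solveScan rest [p0].length 0 p0 := by
    simp [solveScan]
  rw [h0]
  have := scan_inv rest [p0] 0 p0 (by simp) (by simp) (by simp) (by simp)
  simpa using this

-- --- sumPos facts ---

lemma sum_le_sumPos (p : List Int) : p.sum ≤ sumPos p := by
  induction p with
  | nil => simp [sumPos]
  | cons e rest ih => simp only [sumPos, List.map_cons, List.sum_cons] at *; omega

lemma sumPos_pos_elem (p : List Int) (h : 0 < sumPos p) : ∃ e ∈ p, 0 < e := by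
  induction p with
  | nil => simp [sumPos] at h
  | cons e rest ih =>
    simp only [sumPos, List.map_cons, List.sum_cons] at h
    by_cases he : 0 < e
    · exact ⟨e, by simp, he⟩
    · have : 0 < sumPos rest := by simp only [sumPos]; omega
      obtain ⟨x, hx, hx'⟩ := ih this
      exact ⟨x, by simp [hx], hx'⟩

lemma sumPos_split (A B : List Int) (x : Int) :
    sumPos (A ++ x :: B) = sumPos A + max x 0 + sumPos B := by
  simp [sumPos]; ring


-- --- A's main loop emits the level sequence truncated to `total` moves ---

lemma main_eq (t : Nat) : ∀ (total : Int) (p : List Int) (moves : List String) (mxI : Int),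
    total.toNat = t → 0 ≤ total → total ≤ sumPos p → (∀ e ∈ p, e ≤ mxI) →
    solveMain p total moves = moves ++ (List.take total.toNat (rowsF p mxI.toNat)).map pyChr := by
  induction t with
  | zero =>
    intro total p moves mxI ht h0 _ _
    rw [solveMain.eq_def, if_neg (by omega : ¬ 0 < total)]
    simp [ht]
  | succ t ih =>
    intro total p moves mxI ht h0 hsp hle
    have htpos : 0 < total := by omega
    have hspp : 0 < sumPos p := by omega
    obtain ⟨e0, he0, he0p⟩ := sumPos_pos_elem p hspp
    cases p with
    | nil => simp at he0
    | cons p0 rest =>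
      obtain ⟨F1, F2, F3, F4⟩ := scan_full p0 rest
      set s := solveScan (p0 :: rest) 0 0 p0 with hs
      have hmv1 : 1 ≤ s.2 := by have := F4 e0 he0; omega
      have hmem : s.2 ∈ p0 :: rest := List.mem_of_getElem? F2
      have hmvmx : s.2 ≤ mxI := hle _ hmem
      set A := (p0 :: rest).take s.1 with hA
      set B := (p0 :: rest).drop (s.1 + 1) with hB
      have hlenA : A.length = s.1 := by rw [hA, List.length_take_of_le (le_of_lt F1)]
      have hP : p0 :: rest = A ++ s.2 :: B := by
        conv_lhs => rw [← List.take_append_drop s.1 (p0 :: rest)]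
        rw [← List.getElem_cons_drop F1]
        have : (p0 :: rest)[s.1] = s.2 := by
          have := List.getElem?_eq_some_iff.1 F2; exact this.2.symm ▸ rfl
        rw [this]
      have hmod : (p0 :: rest).modify s.1 (fun e => e - 1) = A ++ (s.2 - 1) :: B := by
        conv_lhs => rw [hP, ← hlenA]
        exact modify_append A B s.2 _
      have hA_lt : ∀ e ∈ A, e < s.2 := F3
      have hrow_p : rowIdx (p0 :: rest) 0 s.2 = s.1 :: rowIdx B (s.1 + 1) s.2 := by
        conv_lhs => rw [hP]
        rw [rowIdx_append, rowIdx_nil_of_lt A _ _ hA_lt]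
        simp [rowIdx, hlenA]
      have hrow_p' : rowIdx (A ++ (s.2 - 1) :: B) 0 s.2 = rowIdx B (s.1 + 1) s.2 := by
        rw [rowIdx_append, rowIdx_nil_of_lt A _ _ hA_lt]
        simp [rowIdx, hlenA, show ¬ (s.2 ≤ s.2 - 1) by omega]
      have hbelow : ∀ v : Int, 1 ≤ v → v ≤ s.2 - 1 → rowIdx (A ++ (s.2 - 1) :: B) 0 v = rowIdx (p0 :: rest) 0 v := by
        intro v h1 h2
        conv_rhs => rw [hP]
        rw [rowIdx_append, rowIdx_append]
        congr 1
        simp [rowIdx, show v ≤ s.2 - 1 from h2, show v ≤ s.2 by omega]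
      have hle_p' : ∀ e ∈ A ++ (s.2 - 1) :: B, e ≤ s.2 := by
        intro x hx
        rcases List.mem_append.1 hx with h | h
        · exact le_of_lt (hA_lt x h)
        · rcases List.mem_cons.1 h with h | h
          · omega
          · exact F4 x (by rw [hP]; exact List.mem_append_right _ (List.mem_cons_of_mem _ h))
      have hle_mx' : ∀ e ∈ (p0 :: rest).modify s.1 (fun e => e - 1), e ≤ mxI := by
        rw [hmod]; intro x hx; have := hle_p' x hx; omega
      have hsum' : total - 1 ≤ sumPos ((p0 :: rest).modify s.1 (fun e => e - 1)) := by
        rw [hmod, sumPos_split]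
        rw [hP, sumPos_split] at hsp
        omega
      have hk : s.2.toNat = (s.2.toNat - 1) + 1 := by omega
      have hcast : ((s.2.toNat - 1 : Nat) : Int) + 1 = s.2 := by omega
      have h1 : rowsF (p0 :: rest) mxI.toNat = rowsF (p0 :: rest) s.2.toNat :=
        rows_bound _ s.2 F4 _ (by omega)
      have h2 : rowsF (p0 :: rest) s.2.toNat = (s.1 :: rowIdx B (s.1 + 1) s.2) ++ rowsF (p0 :: rest) (s.2.toNat - 1) := by
        conv_lhs => rw [hk]
        rw [rowsF, hcast, hrow_p]
      have h3 : rowsF (A ++ (s.2 - 1) :: B) mxI.toNat = rowIdx B (s.1 + 1) s.2 ++ rowsF (p0 :: rest) (s.2.toNat - 1) := by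
        rw [rows_bound _ s.2 hle_p' _ (by omega)]
        conv_lhs => rw [hk]
        rw [rowsF, hcast, hrow_p']
        congr 1
        exact rows_congr_below _ _ (s.2 - 1) hbelow _ (by omega)
      have hIH := ih (total - 1) ((p0 :: rest).modify s.1 (fun e => e - 1)) (moves ++ [pyChr s.1]) mxI
        (by omega) (by omega) hsum' hle_mx'
      rw [hmod, h3] at hIH
      rw [solveMain, if_pos htpos]
      simp only [← hs]
      rw [hmod, hIH, h1, h2]
      have htt : total.toNat = t + 1 := ht
      have htt1 : (total - 1).toNat = t := by omega
      rw [htt, htt1]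
      simp [List.take_succ_cons]


-- --- B's level sweep computes the same level sequence ---

lemma altChr_eq_pyChr : altChr = pyChr := rfl

lemma altRow_eq (l : List Int) : ∀ (k : Nat) (v : Int) (acc : List String),
    altRow l k v acc = acc ++ (rowIdx l k v).map pyChr := by
  induction l with
  | nil => intro k v acc; simp [altRow, rowIdx]
  | cons e rest ih =>
    intro k v acc
    simp only [altRow, rowIdx, altChr_eq_pyChr]
    by_cases h : v ≤ e
    · rw [if_pos h, if_pos h, ih]; simp
    · rw [if_neg h, if_neg h, ih]

lemma altLevels_eq (p : List Int) (t : Nat) : ∀ (v : Int) (acc : List String), v.toNat = t →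
    altLevels p v acc = acc ++ (rowsF p v.toNat).map pyChr := by
  induction t with
  | zero =>
    intro v acc ht
    rw [altLevels, if_neg (by omega : ¬ 0 < v), ht]
    simp [rowsF]
  | succ t ih =>
    intro v acc ht
    have hv : 0 < v := by omega
    rw [altLevels, if_pos hv, ih (v - 1) _ (by omega), altRow_eq, ht]
    have hc : ((t : Int)) + 1 = v := by omega
    have ht1 : (v - 1).toNat = t := by omega
    rw [rowsF, hc, ht1]
    simp

-- ===== VERDICT (by name: the statement is the Claim_ definition above) =====
theorem solve_spec : Claim_equal_solve := by
  intro n p _hdom hpre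
  unfold Spec_solve
  by_cases hn : n = 2
  · unfold Pre_solve at hpre
    rw [if_pos hn] at hpre
    obtain ⟨hlen, hord⟩ := hpre
    match p, hlen with
    | p0 :: p1 :: rest, _ =>
      simp only [List.getD, List.getElem?_cons_succ, List.getElem?_cons_zero, Option.getD_some] at hord
      have hord' : p1 ≤ p0 := hord
      simp only [solve, solve_alt, if_pos hn]
      have hk : p0 = p1 + ((p0 - p1).toNat : Int) := by omega
      conv_lhs => rw [hk]
      rw [loopA_eq]
      rw [if_pos hord']
      simp only [List.nil_append]
      have h2 := loopAB_snd p1.toNat p1 (List.replicate (p0 - p1).toNat "A") rfl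
      rw [h2]
  · unfold Pre_solve at hpre
    rw [if_neg hn] at hpre
    have hptot : 0 ≤ p.sum := by omega
    have hne : p ≠ [] := by intro h; rw [h] at hpre; simp at hpre
    obtain ⟨mx, hmx⟩ : ∃ mx, PySem.List.max? p (fun x => x) = some mx := by
      cases h : PySem.List.max? p (fun x => x) with
      | none => exact absurd ((PySem.List.max?_eq_none_iff _ _).1 h) hne
      | some mx => exact ⟨mx, rfl⟩
    have hmax : ∀ e ∈ p, e ≤ mx := PySem.List.max?_isMax hmx
    have hA := main_eq p.sum.toNat p.sum p [] mx rfl hptot (sum_le_sumPos p) hmax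
    have hB := altLevels_eq p mx.toNat mx [] rfl
    simp only [solve, solve_alt, if_neg hn, hmx]
    rw [hA, hB]
    rw [PySem.List.slice_to _ hptot]
    simp only [List.nil_append, List.map_take]
    cases PySem.List.pyGet? (List.take p.sum.toNat (List.map pyChr (rowsF p mx.toNat))) (-2) <;>
      cases PySem.List.pyGet? (List.take p.sum.toNat (List.map pyChr (rowsF p mx.toNat))) (-1) <;> rfl
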